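-- pv_equiv track=rewrite | github.com/TNMThangHo/workflowtest | test-gen/test_matrix.py | generate_full_factorial
-- ===== SOURCE A (Python) =====
-- import itertools
--
-- def generate_full_factorial(factors):
--     """
--     Generate Full Factorial combinations (Cartesian Product).
--     factors: dict { "param_name": [val1, val2] }
--     """
--     keys = list(factors.keys())
--     values = list(factors.values())
--
--     combinations = list(itertools.product(*values))
--
--     result = []
--     for combo in combinations:
--         # Zip keys with values to make readable dict
--         scenario = dict(zip(keys, combo))
--         result.append(scenario)
--
--     return result
-- ===== SOURCE B (Python) =====
-- def generate_full_factorial(factors):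
--     """
--     Generate Full Factorial combinations (Cartesian Product).
--     factors: dict { "param_name": [val1, val2] }
--     """
--     result = [{}]
--     for key, vals in factors.items():
--         result = [{**partial, key: v} for partial in result for v in vals]
--     return result
-- ===== Notes on version B (the rewrite author's own statement) =====
-- stated objective: alternative
-- what changed: Replaces itertools.product over the value lists plus a zip-into-dict pass by a single incremental fold that starts from the single empty scenario and extends every partial scenario with each value of the next factor.
import Mathlib
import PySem

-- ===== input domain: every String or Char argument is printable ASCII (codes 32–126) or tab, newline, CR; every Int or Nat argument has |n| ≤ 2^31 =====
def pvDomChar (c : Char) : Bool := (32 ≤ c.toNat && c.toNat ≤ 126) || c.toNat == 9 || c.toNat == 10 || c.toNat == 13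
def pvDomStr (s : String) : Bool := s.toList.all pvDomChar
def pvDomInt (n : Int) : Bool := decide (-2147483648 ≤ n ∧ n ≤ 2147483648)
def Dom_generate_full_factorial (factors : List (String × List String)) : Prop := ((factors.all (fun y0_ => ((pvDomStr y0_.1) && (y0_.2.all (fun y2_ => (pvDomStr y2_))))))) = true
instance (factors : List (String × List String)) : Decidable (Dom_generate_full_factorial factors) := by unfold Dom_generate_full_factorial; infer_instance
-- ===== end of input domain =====

-- B replaces A's itertools.product + zip-into-dict passes by one incremental fold
-- that extends every partial scenario with each value of the next factor (objective: alternative).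

-- ===== PORT A =====
-- itertools.product(*values): first factor varies slowest, last fastest.
def pvProduct : List (List String) → List (List String)
  | [] => [[]]
  | vs :: rest => vs.flatMap (fun v => (pvProduct rest).map (fun t => v :: t))

def generate_full_factorial (factors : List (String × List String)) : List (List (String × String)) :=
  let keys := factors.map (·.1)
  let values := factors.map (·.2)
  let combinations := pvProduct values
  -- dict(zip(keys, combo)): keys of a Python dict are distinct, so this is keys.zip combo
  combinations.foldl (fun result combo => result ++ [keys.zip combo]) []

-- ===== PORT B =====
def generate_full_factorial_alt (factors : List (String × List String)) : List (List (String × String)) :=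
  factors.foldl
    (fun result kv => result.flatMap (fun partial_ => kv.2.map (fun v => partial_ ++ [(kv.1, v)])))
    [[]]

-- ===== PRECONDITION & SPEC =====
def Spec_generate_full_factorial (factors : List (String × List String)) (out : List (List (String × String))) : Prop := out = generate_full_factorial_alt factors
instance (factors : List (String × List String)) (out : List (List (String × String))) : Decidable (Spec_generate_full_factorial factors out) := by unfold Spec_generate_full_factorial; infer_instance

-- ===== CLAIM (what is proved, stated in full; the proofs are below) =====
def Claim_equal_generate_full_factorial : Prop := ∀ (factors : List (String × List String)), Dom_generate_full_factorial factors → Spec_generate_full_factorial factors (generate_full_factorial factors)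

-- ===== LEMMAS AND PROOFS =====

-- A's append-accumulating loop is acc ++ map.
theorem foldl_append_map {α β : Type} (f : α → β) :
    ∀ (l : List α) (acc : List β),
      l.foldl (fun r c => r ++ [f c]) acc = acc ++ l.map f := by
  intro l
  induction l with
  | nil => simp
  | cons x xs ih => intro acc; simp [List.foldl_cons, ih]

-- B's fold, characterised via A's product over the remaining factors.
theorem alt_foldl_eq :
    ∀ (factors : List (String × List String)) (acc : List (List (String × String))),
      factors.foldl
        (fun result kv => result.flatMap (fun partial_ => kv.2.map (fun v => partial_ ++ [(kv.1, v)])))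
        acc
      = acc.flatMap (fun p =>
          (pvProduct (factors.map (·.2))).map (fun combo => p ++ (factors.map (·.1)).zip combo)) := by
  intro factors
  induction factors with
  | nil => intro acc; simp [pvProduct]
  | cons kv rest ih =>
    intro acc
    simp only [List.foldl_cons, ih, pvProduct, List.map_cons]
    simp [List.flatMap_assoc, List.map_flatMap, List.flatMap_map, List.map_map,
      Function.comp_def, List.zip_cons_cons, List.append_assoc]

-- ===== VERDICT (by name: the statement is the Claim_ definition above) =====
theorem generate_full_factorial_spec : Claim_equal_generate_full_factorial := by
  intro factors _
  unfold Spec_generate_full_factorial generate_full_factorial generate_full_factorial_alt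
  rw [foldl_append_map, alt_foldl_eq]
  simp
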